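-- pv_equiv track=rewrite | github.com/OlehYavoriv/Number-system-converter | Converter(GUI).py | chunk_str_from_end
-- ===== SOURCE A (Python) =====
-- def chunk_str_from_end(string, chunk_size):
--     result = []
--     i = len(string)
--     while i > 0:
--         if i - chunk_size > 0:
--             result.append(string[i - chunk_size:i])
--         else:
--             result.append(string[0:i])
--         i -= chunk_size
--     return result
-- ===== SOURCE B (Python) =====
-- def chunk_str_from_end(string, chunk_size):
--     if not string:
--         return []
--     r = len(string) % chunk_size
--     parts = []
--     if r:
--         parts.append(string[:r])
--     for j in range(r, len(string), chunk_size):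
--         parts.append(string[j:j + chunk_size])
--     parts.reverse()
--     return parts
-- ===== Notes on version B (the rewrite author's own statement) =====
-- stated objective: simpler
-- what changed: A walks an index backwards from len(string) in a while loop, slicing each chunk as it goes; B computes the leading-chunk length with one modulo, slices forward over a range, and reverses the list once.
import Mathlib
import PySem

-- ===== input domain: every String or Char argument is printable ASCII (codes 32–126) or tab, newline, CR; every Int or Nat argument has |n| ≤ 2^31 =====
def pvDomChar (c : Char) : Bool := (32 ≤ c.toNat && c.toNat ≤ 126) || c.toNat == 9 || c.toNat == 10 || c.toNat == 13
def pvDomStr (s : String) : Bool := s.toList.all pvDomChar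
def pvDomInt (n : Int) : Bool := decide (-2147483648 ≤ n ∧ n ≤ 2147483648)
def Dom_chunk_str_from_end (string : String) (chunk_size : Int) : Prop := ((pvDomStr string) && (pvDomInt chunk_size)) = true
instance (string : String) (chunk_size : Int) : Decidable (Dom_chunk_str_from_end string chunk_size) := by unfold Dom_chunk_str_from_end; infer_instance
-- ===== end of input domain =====

-- B replaces A's backward while-loop by a forward pass: one modulo gives the length of the
-- end-aligned leading chunk, a range slices forward, one reverse at the end (objective: simpler).

-- ===== PORT A =====
-- A's while loop: i counts down from len(string) by chunk_size; the fuel bounds the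
-- iteration count (len(string)+1 iterations suffice whenever the Python loop terminates,
-- i.e. on Pre_; outside Pre_ the Python loop never returns).
def pvALoop (s : String) (cs : Int) : Nat → Int → List String → List String
  | 0, _, acc => acc
  | fuel + 1, i, acc =>
    if i > 0 then
      let acc := if i - cs > 0 then acc ++ [PySem.Str.slice s (some (i - cs)) (some i)]
                 else acc ++ [PySem.Str.slice s (some 0) (some i)]
      pvALoop s cs fuel (i - cs) acc
    else acc

def chunk_str_from_end (string : String) (chunk_size : Int) : List String :=
  pvALoop string chunk_size (string.toList.length + 1) (PySem.Str.len string) []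

-- ===== PORT B =====
def chunk_str_from_end_alt (string : String) (chunk_size : Int) : List String :=
  if string = "" then []
  else
    let r := PySem.Int.mod (PySem.Str.len string) chunk_size
    let parts : List String := if r ≠ 0 then [PySem.Str.slice string (some 0) (some r)] else []
    let parts := (PySem.List.pyRange r (PySem.Str.len string) chunk_size).foldl
      (fun acc j => acc ++ [PySem.Str.slice string (some j) (some (j + chunk_size))]) parts
    parts.reverse

-- ===== PRECONDITION & SPEC =====
-- Pre_ excludes exactly the inputs on which A never returns: with a nonempty string
-- and chunk_size ≤ 0 the Python while-loop is infinite.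
def Pre_chunk_str_from_end (string : String) (chunk_size : Int) : Prop :=
  0 < chunk_size ∨ string = ""
instance (string : String) (chunk_size : Int) : Decidable (Pre_chunk_str_from_end string chunk_size) := by unfold Pre_chunk_str_from_end; infer_instance

def pvWitness_chunk_str_from_end : String × Int := ("abcdefg", 3)

def Spec_chunk_str_from_end (string : String) (chunk_size : Int) (out : List String) : Prop := out = chunk_str_from_end_alt string chunk_size
instance (string : String) (chunk_size : Int) (out : List String) : Decidable (Spec_chunk_str_from_end string chunk_size out) := by unfold Spec_chunk_str_from_end; infer_instance

-- ===== CLAIM (what is proved, stated in full; the proofs are below) =====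
def Claim_equal_chunk_str_from_end : Prop := ∀ (string : String) (chunk_size : Int), Dom_chunk_str_from_end string chunk_size → Pre_chunk_str_from_end string chunk_size → Spec_chunk_str_from_end string chunk_size (chunk_str_from_end string chunk_size)

-- ===== LEMMAS AND PROOFS =====

-- B's forward chunk list (before the final reverse), at loop variable i.
def pvP (s : String) (cs i : Int) : List String :=
  (if PySem.Int.mod i cs ≠ 0 then [PySem.Str.slice s (some 0) (some (PySem.Int.mod i cs))] else [])
    ++ (PySem.List.pyRange (PySem.Int.mod i cs) i cs).map
         (fun j => PySem.Str.slice s (some j) (some (j + cs)))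

theorem pvFoldl_append_map {α β : Type} (f : α → β) (l : List α) (init : List β) :
    l.foldl (fun acc j => acc ++ [f j]) init = init ++ l.map f := by
  induction l generalizing init with
  | nil => simp
  | cons x xs ih => simp [List.foldl, ih]

theorem pvALoop_nonpos (s : String) (cs : Int) (fuel : Nat) (i : Int) (acc : List String)
    (hi : ¬ i > 0) : pvALoop s cs fuel i acc = acc := by
  cases fuel <;> simp [pvALoop, hi]

theorem pvALoop_acc (s : String) (cs : Int) (fuel : Nat) :
    ∀ (i : Int) (acc : List String),
      pvALoop s cs fuel i acc = acc ++ pvALoop s cs fuel i [] := by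
  induction fuel with
  | zero => intro i acc; simp [pvALoop]
  | succ fuel ih =>
    intro i acc
    by_cases hi : i > 0
    · simp only [pvALoop, if_pos hi]
      by_cases hc : i - cs > 0
      · simp only [if_pos hc]
        rw [ih (i - cs) (acc ++ [PySem.Str.slice s (some (i - cs)) (some i)]),
            ih (i - cs) ([] ++ [PySem.Str.slice s (some (i - cs)) (some i)])]
        simp
      · simp only [if_neg hc]
        rw [ih (i - cs) (acc ++ [PySem.Str.slice s (some 0) (some i)]),
            ih (i - cs) ([] ++ [PySem.Str.slice s (some 0) (some i)])]
        simp
    · simp [pvALoop, hi]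

-- splitting off the last element of a step-cs range whose endpoints are congruent mod cs
theorem pvRange_snoc (r i cs m : Int) (hcs : 0 < cs) (hm : i - r = cs * m)
    (hle : cs ≤ i - r) :
    PySem.List.pyRange r i cs = PySem.List.pyRange r (i - cs) cs ++ [i - cs] := by
  have hm1 : 1 ≤ m := by nlinarith
  have hdiv0 : (cs - 1) / cs = 0 := Int.ediv_eq_zero_of_lt (by omega) (by omega)
  have hc1 : (i - r + cs - 1) / cs = m := by
    have h : i - r + cs - 1 = (cs - 1) + cs * m := by linarith
    rw [h, Int.add_mul_ediv_left _ _ (by omega : cs ≠ 0), hdiv0, zero_add]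
  have hc2 : (i - cs - r + cs - 1) / cs = m - 1 := by
    have h : i - cs - r + cs - 1 = (cs - 1) + cs * (m - 1) := by ring_nf; linarith
    rw [h, Int.add_mul_ediv_left _ _ (by omega : cs ≠ 0), hdiv0, zero_add]
  rw [PySem.List.pyRange_of_pos r i hcs, PySem.List.pyRange_of_pos r (i - cs) hcs]
  have hri : r < i := by linarith
  rw [if_pos hri, hc1]
  have hcount2 : (if r < i - cs then ((i - cs - r + cs - 1) / cs).toNat else 0) = (m - 1).toNat := by
    split
    · rw [hc2]
    · have hreq : r = i - cs := by omega
      have : cs * m = cs * 1 := by linarith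
      have hm1' : m = 1 := by
        have := mul_left_cancel₀ (by omega : cs ≠ 0) this
        omega
      simp [hm1']
  rw [hcount2]
  have hms : m.toNat = (m - 1).toNat + 1 := by omega
  rw [hms, List.range_succ, List.map_append]
  congr 1
  have hcast : ((m - 1).toNat : Int) = m - 1 := by omega
  simp only [List.map_cons, List.map_nil]
  congr 1
  rw [hcast, mul_sub, mul_one]
  linarith

theorem pvMod_lemma (i cs : Int) (hcs : 0 < cs) :
    PySem.Int.mod i cs = i % cs :=
  PySem.Int.mod_eq_emod_of_pos hcs

theorem pvP_step (s : String) (cs i : Int) (hcs : 0 < cs) (hc : i - cs > 0) :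
    pvP s cs i = pvP s cs (i - cs) ++ [PySem.Str.slice s (some (i - cs)) (some i)] := by
  unfold pvP
  rw [pvMod_lemma _ _ hcs, pvMod_lemma _ _ hcs, Int.sub_emod_right]
  have hm : i - i % cs = cs * (i / cs) := by
    have := Int.emod_def i cs
    omega
  have hle : cs ≤ i - i % cs := by
    have h1 : i % cs < cs := Int.emod_lt_of_pos i hcs
    have h2 : 0 ≤ i % cs := Int.emod_nonneg i (by omega)
    -- i - i % cs = cs * (i / cs) > 0 hence i / cs ≥ 1 hence ≥ cs
    have hpos : 0 < cs * (i / cs) := by omega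
    have hq : 1 ≤ i / cs := by nlinarith
    nlinarith
  rw [pvRange_snoc (i % cs) i cs (i / cs) hcs hm hle, List.map_append]
  have : (i - cs) + cs = i := by ring
  simp [this, List.append_assoc]

theorem pvKey (s : String) (cs : Int) (hcs : 0 < cs) :
    ∀ (fuel : Nat) (i : Int), 0 < i → i ≤ (fuel : Int) →
      pvALoop s cs fuel i [] = (pvP s cs i).reverse := by
  intro fuel
  induction fuel with
  | zero => intro i h1 h2; omega
  | succ fuel ih =>
    intro i hi hile
    simp only [pvALoop, if_pos (show i > 0 from hi)]
    by_cases hc : i - cs > 0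
    · simp only [if_pos hc]
      rw [pvALoop_acc, ih (i - cs) (by omega) (by push_cast at hile ⊢; omega)]
      rw [pvP_step s cs i hcs hc, List.reverse_append]
      simp
    · simp only [if_neg hc]
      rw [pvALoop_nonpos s cs fuel (i - cs) _ (by omega)]
      have hP : pvP s cs i = [PySem.Str.slice s (some 0) (some i)] := by
        unfold pvP
        rw [pvMod_lemma _ _ hcs]
        by_cases hlt : i < cs
        · have hr : i % cs = i := Int.emod_eq_of_lt (by omega) hlt
          rw [hr]
          rw [PySem.List.pyRange_of_pos i i hcs, if_neg (show ¬ i < i by omega)]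
          simp [(show i ≠ 0 by omega)]
        · have hieq : i = cs := by omega
          rw [hieq, Int.emod_self]
          rw [pvRange_snoc 0 cs cs 1 hcs (by ring) (by omega)]
          rw [PySem.List.pyRange_of_pos 0 (cs - cs) hcs, if_neg (show ¬ (0:Int) < cs - cs by omega)]
          simp
      rw [hP]
      simp

-- ===== VERDICT (by name: the statement is the Claim_ definition above) =====
theorem chunk_str_from_end_spec : Claim_equal_chunk_str_from_end := by
  intro s cs _ hpre
  unfold Spec_chunk_str_from_end chunk_str_from_end chunk_str_from_end_alt
  by_cases hs : s = ""
  · subst hs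
    simp [pvALoop]
  · rw [if_neg hs]
    have hcs : 0 < cs := hpre.resolve_right hs
    have hlen : PySem.Str.len s = (s.toList.length : Int) := by simp
    have htl : s.toList ≠ [] := by simp [String.toList_eq_nil_iff] at *; exact hs
    have hpos : 0 < s.toList.length := List.length_pos_of_ne_nil htl
    show pvALoop s cs (s.toList.length + 1) (PySem.Str.len s) [] =
      ((PySem.List.pyRange (PySem.Int.mod (PySem.Str.len s) cs) (PySem.Str.len s) cs).foldl
        (fun acc j => acc ++ [PySem.Str.slice s (some j) (some (j + cs))])
        (if PySem.Int.mod (PySem.Str.len s) cs ≠ 0 then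
          [PySem.Str.slice s (some 0) (some (PySem.Int.mod (PySem.Str.len s) cs))] else [])).reverse
    rw [pvFoldl_append_map]
    rw [pvKey s cs hcs (s.toList.length + 1) (PySem.Str.len s)
        (by rw [hlen]; exact_mod_cast hpos) (by rw [hlen]; push_cast; omega)]
    rfl
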